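-- pv_equiv track=rewrite | github.com/deep5050/CalendarFusion | CalendarFusion/lang.py | get_lang_dict
-- ===== SOURCE A (Python) =====
-- def get_lang_dict(lang="en"):
--     dic = {}
--     colnames = ["Week", "Mon", "Tue", "Wed", "Thu", "Fri", "Sat", "Sun"]
--     colnames_ja = ["週", "月", "火", "水", "木", "金", "土", "日"]
--     colnames_tw = ["週", "一", "二", "三", "四", "五", "六", "日"]  # Taiwan
--     colnames_hi = [
--         "सप्ताह",
--         "सोम",
--         "मंगल",
--         "बुध",
--         "गुरु",
--         "शुक्र",
--         "शनि",
--         "रवि",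
--     ]  # Hindi
--     colnames_bn = [
--         "সপ্তাহ",
--         "সোম",
--         "মঙ্গল",
--         "বুধ",
--         "বৃহঃ",
--         "শুক্র",
--         "শনি",
--         "রবি",
--     ]  # Bengali
--
--     if lang == "en":
--         for col in colnames:
--             dic[col] = col
--     elif lang == "tw":
--         for col, colja in zip(colnames, colnames_tw):
--             dic[col] = colja
--     elif lang == "ja":
--         for col, colja in zip(colnames, colnames_ja):
--             dic[col] = colja
--     elif lang == "hi":
--         for col, colja in zip(colnames, colnames_hi):
--             dic[col] = colja
--     elif lang == "bn":
--         for col, colja in zip(colnames, colnames_bn):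
--             dic[col] = colja
--     else:
--         for col in colnames:
--             dic[col] = col
--     return dic
-- ===== SOURCE B (Python) =====
-- # Transposed data layout: one row per day name carrying its translations;
-- # a single pass selects per row (identity fallback), instead of parallel
-- # per-language column lists zipped by an if/elif chain.
-- _ROWS = [
--     ("Week", {"tw": "週", "ja": "週", "hi": "सप्ताह", "bn": "সপ্তাহ"}),
--     ("Mon", {"tw": "一", "ja": "月", "hi": "सोम", "bn": "সোম"}),
--     ("Tue", {"tw": "二", "ja": "火", "hi": "मंगल", "bn": "মঙ্গল"}),
--     ("Wed", {"tw": "三", "ja": "水", "hi": "बुध", "bn": "বুধ"}),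
--     ("Thu", {"tw": "四", "ja": "木", "hi": "गुरु", "bn": "বৃহঃ"}),
--     ("Fri", {"tw": "五", "ja": "金", "hi": "शुक्र", "bn": "শুক্র"}),
--     ("Sat", {"tw": "六", "ja": "土", "hi": "शनि", "bn": "শনি"}),
--     ("Sun", {"tw": "日", "ja": "日", "hi": "रवि", "bn": "রবি"}),
-- ]
--
-- def get_lang_dict(lang="en"):
--     return {key: trans.get(lang, key) for key, trans in _ROWS}
-- ===== Notes on version B (the rewrite author's own statement) =====
-- stated objective: alternative
-- what changed: Transposed the data layout: instead of five parallel per-language column lists dispatched by an if/elif chain of zip loops, B stores one row per day name with its translations and builds the dict in a single pass selecting per row with an identity fallback.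
import Mathlib
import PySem

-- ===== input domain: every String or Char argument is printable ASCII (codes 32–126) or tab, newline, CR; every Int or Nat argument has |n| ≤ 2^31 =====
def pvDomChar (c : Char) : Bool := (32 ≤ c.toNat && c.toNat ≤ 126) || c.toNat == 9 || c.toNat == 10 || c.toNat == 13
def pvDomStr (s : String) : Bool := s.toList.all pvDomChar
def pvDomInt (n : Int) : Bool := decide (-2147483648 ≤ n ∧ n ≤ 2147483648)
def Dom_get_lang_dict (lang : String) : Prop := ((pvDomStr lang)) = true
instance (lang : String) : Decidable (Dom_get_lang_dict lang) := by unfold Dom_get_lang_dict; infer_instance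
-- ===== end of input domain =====

-- B transposes the data: one row per day name carrying its translations, built in a
-- single selecting pass, instead of per-language column lists zipped by an if/elif chain
-- (alternative decomposition; same O(1) cost).


-- ===== PORT A =====
def pvColnames : List String := ["Week", "Mon", "Tue", "Wed", "Thu", "Fri", "Sat", "Sun"]
def pvColnamesJa : List String := ["週", "月", "火", "水", "木", "金", "土", "日"]
def pvColnamesTw : List String := ["週", "一", "二", "三", "四", "五", "六", "日"]
def pvColnamesHi : List String := ["सप्ताह", "सोम", "मंगल", "बुध", "गुरु", "शुक्र", "शनि", "रवि"]
def pvColnamesBn : List String := ["সপ্তাহ", "সোম", "মঙ্গল", "বুধ", "বৃহঃ", "শুক্র", "শনি", "রবি"]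

def get_lang_dict (lang : String) : List (String × String) :=
  let dic : PySem.Dict String String := PySem.Dict.empty
  let dic :=
    if lang == "en" then
      pvColnames.foldl (fun d col => d.insert col col) dic
    else if lang == "tw" then
      (pvColnames.zip pvColnamesTw).foldl (fun d p => d.insert p.1 p.2) dic
    else if lang == "ja" then
      (pvColnames.zip pvColnamesJa).foldl (fun d p => d.insert p.1 p.2) dic
    else if lang == "hi" then
      (pvColnames.zip pvColnamesHi).foldl (fun d p => d.insert p.1 p.2) dic
    else if lang == "bn" then
      (pvColnames.zip pvColnamesBn).foldl (fun d p => d.insert p.1 p.2) dic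
    else
      pvColnames.foldl (fun d col => d.insert col col) dic
  dic.items

-- ===== PORT B =====
-- transposed data: each day name with its per-language translations (Source B's _ROWS)
def pvRows : List (String × List (String × String)) :=
  [ ("Week", [("tw", "週"), ("ja", "週"), ("hi", "सप्ताह"), ("bn", "সপ্তাহ")]),
    ("Mon",  [("tw", "一"), ("ja", "月"), ("hi", "सोम"), ("bn", "সোম")]),
    ("Tue",  [("tw", "二"), ("ja", "火"), ("hi", "मंगल"), ("bn", "মঙ্গল")]),
    ("Wed",  [("tw", "三"), ("ja", "水"), ("hi", "बुध"), ("bn", "বুধ")]),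
    ("Thu",  [("tw", "四"), ("ja", "木"), ("hi", "गुरु"), ("bn", "বৃহঃ")]),
    ("Fri",  [("tw", "五"), ("ja", "金"), ("hi", "शुक्र"), ("bn", "শুক্র")]),
    ("Sat",  [("tw", "六"), ("ja", "土"), ("hi", "शनि"), ("bn", "শনি")]),
    ("Sun",  [("tw", "日"), ("ja", "日"), ("hi", "रवि"), ("bn", "রবি")]) ]

def get_lang_dict_alt (lang : String) : List (String × String) :=
  -- dict comprehension: one pass over the rows, selecting per row with identity fallback
  (pvRows.foldl
    (fun d row =>
      d.insert row.1 (((PySem.Dict.ofList row.2).get? lang).getD row.1))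
    (PySem.Dict.empty : PySem.Dict String String)).items

-- ===== PRECONDITION & SPEC =====
def Spec_get_lang_dict (lang : String) (out : List (String × String)) : Prop := out = get_lang_dict_alt lang
instance (lang : String) (out : List (String × String)) : Decidable (Spec_get_lang_dict lang out) := by unfold Spec_get_lang_dict; infer_instance

-- ===== CLAIM (what is proved, stated in full; the proofs are below) =====
def Claim_equal_get_lang_dict : Prop := ∀ (lang : String), Dom_get_lang_dict lang → Spec_get_lang_dict lang (get_lang_dict lang)

-- ===== LEMMAS AND PROOFS =====

-- ===== VERDICT (by name: the statement is the Claim_ definition above) =====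
theorem get_lang_dict_spec : Claim_equal_get_lang_dict := by
  intro lang _
  unfold Spec_get_lang_dict get_lang_dict get_lang_dict_alt
  by_cases h1 : lang = "en"
  · subst h1; decide
  · by_cases h2 : lang = "tw"
    · subst h2; decide
    · by_cases h3 : lang = "ja"
      · subst h3; decide
      · by_cases h4 : lang = "hi"
        · subst h4; decide
        · by_cases h5 : lang = "bn"
          · subst h5; decide
          · have e1 : (lang == "en") = false := beq_eq_false_iff_ne.mpr h1
            have e2 : (lang == "tw") = false := beq_eq_false_iff_ne.mpr h2
            have e3 : (lang == "ja") = false := beq_eq_false_iff_ne.mpr h3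
            have e4 : (lang == "hi") = false := beq_eq_false_iff_ne.mpr h4
            have e5 : (lang == "bn") = false := beq_eq_false_iff_ne.mpr h5
            simp only [pvColnames, pvRows, PySem.Dict.ofList, PySem.Dict.update,
              List.foldl, PySem.Dict.get?_insert, PySem.Dict.get?_empty,
              e1, e2, e3, e4, e5, Bool.false_eq_true, if_false]
            simp only [if_neg h2, if_neg h3, if_neg h4, if_neg h5, Option.getD_none]
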